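-- pv_equiv track=rewrite | github.com/wll1014/KKB | yunwei/ops_server/platmonitor/dsl/DevConfBasicInfo.py | find_constant_1
-- ===== SOURCE A (Python) =====
-- def find_constant_1(data):
--     """
--     找到0/1列表里1的索引段
--     :param data:
--     :return:
--     """
--
--     def find_first_1(a_list, start):
--         try:
--             start = a_list.index(1, start)
--         except ValueError:
--             return None
--
--         try:
--             end = a_list.index(0, start)
--         except ValueError:
--             return [start, None]
--         else:
--             return [start, end]
--
--     time_dur = []
--     begin = 0
--     while True:
--         start_index = find_first_1(data, begin)
--         if start_index is None:
--             break
--         elif start_index[1] is None: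
--             time_dur.append(start_index)
--             break
--         else:
--             time_dur.append([start_index[0], start_index[1] - 1])
--             begin = start_index[1]
--     return time_dur
-- ===== SOURCE B (Python) =====
-- def find_constant_1(data):
--     """Single linear pass: track the start of the current 1-run instead of
--     repeatedly calling list.index via a helper."""
--     time_dur = []
--     start = None
--     for i, v in enumerate(data):
--         if start is None:
--             if v == 1:
--                 start = i
--         elif v == 0:
--             time_dur.append([start, i - 1])
--             start = None
--     if start is not None:
--         time_dur.append([start, None])
--     return time_dur
-- ===== Notes on version B (the rewrite author's own statement) =====
-- stated objective: simpler
-- what changed: Replaced the find_first_1 helper with its two list.index scans and the restarting while-loop by a single linear pass over enumerate(data) that tracks the start index of the current 1-run and closes it only on a literal 0.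
import Mathlib
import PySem

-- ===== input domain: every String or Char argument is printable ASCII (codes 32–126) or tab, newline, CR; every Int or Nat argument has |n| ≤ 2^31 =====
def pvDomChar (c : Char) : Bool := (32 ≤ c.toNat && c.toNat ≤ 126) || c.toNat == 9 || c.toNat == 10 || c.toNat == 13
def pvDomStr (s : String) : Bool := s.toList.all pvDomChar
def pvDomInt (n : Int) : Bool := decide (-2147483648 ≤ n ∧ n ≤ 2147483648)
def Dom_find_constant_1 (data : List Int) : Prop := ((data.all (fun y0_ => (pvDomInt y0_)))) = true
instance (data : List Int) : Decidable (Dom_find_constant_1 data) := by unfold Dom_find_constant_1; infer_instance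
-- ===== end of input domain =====

-- B replaces A's index-based helper and restarting while-loop by one linear pass
-- with a nullable start marker (objective: simpler).

-- ===== PORT A =====
-- a_list.index(v, start): first index ≥ start holding v (Python semantics, exact:
-- PySem.List.index? is the first-match index of the dropped prefix's suffix)
def pvIdxFrom (a_list : List Int) (v : Int) (start : Nat) : Option Nat :=
  (PySem.List.index? (a_list.drop start) v).map (· + start)

-- find_first_1: None ↔ ValueError on index(1,...); (s, none) ↔ [start, None]; (s, some e) ↔ [start, end]
def pvFindFirst1 (a_list : List Int) (start : Nat) : Option (Nat × Option Nat) :=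
  match pvIdxFrom a_list 1 start with
  | none => none
  | some s =>
    match pvIdxFrom a_list 0 s with
    | none => some (s, none)
    | some e => some (s, some e)

-- the while-True loop; fuel only makes the recursion structural (begin strictly increases)
def pvLoopA (data : List Int) : Nat → Nat → List (List (Option Int)) → List (List (Option Int))
  | 0, _, time_dur => time_dur
  | fuel + 1, begin_, time_dur =>
    match pvFindFirst1 data begin_ with
    | none => time_dur
    | some (s, none) => time_dur ++ [[some (s : Int), none]]
    | some (s, some e) => pvLoopA data fuel e (time_dur ++ [[some (s : Int), some ((e : Int) - 1)]])

def find_constant_1 (data : List Int) : List (List (Option Int)) :=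
  pvLoopA data (data.length + 1) 0 []

-- ===== PORT B =====
-- one step of the for-loop: state = (start marker, accumulated segments)
def pvStepB (st : Option Int × List (List (Option Int))) (iv : Int × Int) :
    Option Int × List (List (Option Int)) :=
  match st.1 with
  | none => if iv.2 = 1 then (some iv.1, st.2) else (none, st.2)
  | some s => if iv.2 = 0 then (none, st.2 ++ [[some s, some (iv.1 - 1)]]) else (some s, st.2)

def find_constant_1_alt (data : List Int) : List (List (Option Int)) :=
  let p := (PySem.List.enumerate data).foldl pvStepB (none, [])
  match p.1 with
  | none => p.2
  | some s => p.2 ++ [[some s, none]]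

-- ===== PRECONDITION & SPEC =====
def Spec_find_constant_1 (data : List Int) (out : List (List (Option Int))) : Prop := out = find_constant_1_alt data
instance (data : List Int) (out : List (List (Option Int))) : Decidable (Spec_find_constant_1 data out) := by unfold Spec_find_constant_1; infer_instance

-- ===== CLAIM (what is proved, stated in full; the proofs are below) =====
def Claim_equal_find_constant_1 : Prop := ∀ (data : List Int), Dom_find_constant_1 data → Spec_find_constant_1 data (find_constant_1 data)

-- ===== LEMMAS AND PROOFS =====

-- common reference: scan the suffix xs whose first element has absolute index i,
-- carrying the start of the current 1-run (none = outside a run)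
def pvSpecRun : List Int → Option Nat → Nat → List (List (Option Int))
  | [], none, _ => []
  | [], some s, _ => [[some (s : Int), none]]
  | x :: xs, none, i =>
      if x = 1 then pvSpecRun xs (some i) (i + 1) else pvSpecRun xs none (i + 1)
  | x :: xs, some s, i =>
      if x = 0 then [some (s : Int), some ((i : Int) - 1)] :: pvSpecRun xs none (i + 1)
      else pvSpecRun xs (some s) (i + 1)

-- ---- B = spec ----

def pvFinB (p : Option Int × List (List (Option Int))) : List (List (Option Int)) :=
  match p.1 with
  | none => p.2
  | some s => p.2 ++ [[some s, none]]

theorem pvB_inv (xs : List Int) : ∀ (st : Option Nat) (i : Nat) (acc : List (List (Option Int))),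
    pvFinB ((PySem.List.enumerate xs (i : Int)).foldl pvStepB (st.map (fun s => (s : Int)), acc))
      = acc ++ pvSpecRun xs st i := by
  induction xs with
  | nil =>
    intro st i acc
    cases st <;> simp [PySem.List.enumerate_nil, pvFinB, pvSpecRun]
  | cons x xs ih =>
    intro st i acc
    rw [PySem.List.enumerate_cons]
    cases st with
    | none =>
      by_cases hx : x = 1
      · have := ih (some i) (i + 1) acc
        simp [List.foldl_cons, pvStepB, hx, pvSpecRun, Option.map] at this ⊢
        rw [show ((i : Int) + 1) = ((i + 1 : Nat) : Int) by push_cast; ring]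
        exact this
      · have := ih none (i + 1) acc
        simp [List.foldl_cons, pvStepB, hx, pvSpecRun, Option.map] at this ⊢
        rw [show ((i : Int) + 1) = ((i + 1 : Nat) : Int) by push_cast; ring]
        exact this
    | some s =>
      by_cases hx : x = 0
      · have := ih none (i + 1) (acc ++ [[some (s : Int), some ((i : Int) - 1)]])
        simp [List.foldl_cons, pvStepB, hx, pvSpecRun, Option.map] at this ⊢
        rw [show ((i : Int) + 1) = ((i + 1 : Nat) : Int) by push_cast; ring]
        simpa using this
      · have := ih (some s) (i + 1) acc
        simp [List.foldl_cons, pvStepB, hx, pvSpecRun, Option.map] at this ⊢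
        rw [show ((i : Int) + 1) = ((i + 1 : Nat) : Int) by push_cast; ring]
        exact this

theorem pvB_eq_spec (data : List Int) :
    find_constant_1_alt data = pvSpecRun data none 0 := by
  have := pvB_inv data none 0 []
  simpa [find_constant_1_alt, pvFinB, Option.map] using this

-- ---- A = spec ----

theorem pvSpec_no1 (xs : List Int) (h : (1 : Int) ∉ xs) : ∀ i, pvSpecRun xs none i = [] := by
  induction xs with
  | nil => intro i; simp [pvSpecRun]
  | cons x xs ih =>
    intro i
    simp only [List.mem_cons, not_or] at h
    simp [pvSpecRun, Ne.symm h.1, ih h.2]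

theorem pvSpec_skip_to_1 (pre : List Int) (h : (1 : Int) ∉ pre) :
    ∀ (suf : List Int) (i : Nat),
    pvSpecRun (pre ++ 1 :: suf) none i = pvSpecRun suf (some (i + pre.length)) (i + pre.length + 1) := by
  induction pre with
  | nil => intro suf i; simp [pvSpecRun]
  | cons x pre ih =>
    intro suf i
    simp only [List.mem_cons, not_or] at h
    simp only [List.cons_append, pvSpecRun, if_neg (Ne.symm h.1)]
    rw [ih h.2]
    have hL : i + 1 + pre.length = i + (x :: pre).length := by simp only [List.length_cons]; omega
    rw [hL]

theorem pvSpec_no0 (xs : List Int) (h : (0 : Int) ∉ xs) : ∀ s i, pvSpecRun xs (some s) i = [[some (s : Int), none]] := by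
  induction xs with
  | nil => intro s i; simp [pvSpecRun]
  | cons x xs ih =>
    intro s i
    simp only [List.mem_cons, not_or] at h
    simp [pvSpecRun, Ne.symm h.1, ih h.2]

theorem pvSpec_run_to_0 (pre : List Int) (h : (0 : Int) ∉ pre) :
    ∀ (suf : List Int) (s i : Nat),
    pvSpecRun (pre ++ 0 :: suf) (some s) i
      = [some (s : Int), some (((i + pre.length : Nat) : Int) - 1)] :: pvSpecRun suf none (i + pre.length + 1) := by
  induction pre with
  | nil => intro suf s i; simp [pvSpecRun]
  | cons x pre ih =>
    intro suf s i
    simp only [List.mem_cons, not_or] at h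
    simp only [List.cons_append, pvSpecRun, if_neg (Ne.symm h.1)]
    rw [ih h.2]
    have hL : i + 1 + pre.length = i + (x :: pre).length := by simp only [List.length_cons]; omega
    rw [hL]

theorem pvA_inv (data : List Int) : ∀ (fuel b : Nat) (acc : List (List (Option Int))),
    data.length - b < fuel →
    pvLoopA data fuel b acc = acc ++ pvSpecRun (data.drop b) none b := by
  intro fuel
  induction fuel with
  | zero => intro b acc h; omega
  | succ fuel ih =>
    intro b acc hfuel
    rw [pvLoopA]
    cases h1 : pvIdxFrom data 1 b with
    | none =>
      -- no 1 at index ≥ b: the loop stops and the spec emits nothing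
      have hff : pvFindFirst1 data b = none := by simp [pvFindFirst1, h1]
      rw [hff]
      simp only [pvIdxFrom, Option.map_eq_none_iff, PySem.List.index?_eq_none_iff] at h1
      simp [pvSpec_no1 _ h1]
    | some s =>
      cases h0 : pvIdxFrom data 0 s with
      | none =>
        -- run starts at s and never ends: terminal segment [s, None]
        have hff : pvFindFirst1 data b = some (s, none) := by simp [pvFindFirst1, h1, h0]
        rw [hff]
        simp only [pvIdxFrom, Option.map_eq_some_iff] at h1
        obtain ⟨k, hk, hks⟩ := h1
        rw [PySem.List.index?_eq_some_iff] at hk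
        obtain ⟨pre, suf, hsplit, hlen, hnm⟩ := hk
        have hs : s = b + pre.length := by omega
        have hdrops : data.drop s = 1 :: suf := by
          rw [hs, ← List.drop_drop, hsplit, List.drop_left]
        have hspec : pvSpecRun (data.drop b) none b = pvSpecRun suf (some s) (s + 1) := by
          rw [hsplit, pvSpec_skip_to_1 pre hnm suf b, ← hs]
        simp only [pvIdxFrom, hdrops, Option.map_eq_none_iff, PySem.List.index?_eq_none_iff,
          List.mem_cons, not_or] at h0
        rw [hspec, pvSpec_no0 suf h0.2]
      | some e =>
        -- run [s, e-1], loop restarts at the closing 0 (index e)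
        have hff : pvFindFirst1 data b = some (s, some e) := by simp [pvFindFirst1, h1, h0]
        rw [hff]
        simp only [pvIdxFrom, Option.map_eq_some_iff] at h1
        obtain ⟨k, hk, hks⟩ := h1
        rw [PySem.List.index?_eq_some_iff] at hk
        obtain ⟨pre, suf, hsplit, hlen, hnm⟩ := hk
        have hs : s = b + pre.length := by omega
        have hdrops : data.drop s = 1 :: suf := by
          rw [hs, ← List.drop_drop, hsplit, List.drop_left]
        have hspec : pvSpecRun (data.drop b) none b = pvSpecRun suf (some s) (s + 1) := by
          rw [hsplit, pvSpec_skip_to_1 pre hnm suf b, ← hs]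
        simp only [pvIdxFrom, hdrops, Option.map_eq_some_iff] at h0
        obtain ⟨m, hm, hme⟩ := h0
        rw [PySem.List.index?_cons_of_ne suf (by norm_num)] at hm
        simp only [Option.map_eq_some_iff] at hm
        obtain ⟨m', hm', hmm⟩ := hm
        rw [PySem.List.index?_eq_some_iff] at hm'
        obtain ⟨pre2, suf2, hsplit2, hlen2, hnm2⟩ := hm'
        have he : e = s + 1 + pre2.length := by omega
        have hdrope : data.drop e = 0 :: suf2 := by
          have hd1 : data.drop (s + 1) = suf := by
            have h := congrArg (fun l => List.drop 1 l) hdrops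
            simp only [List.drop_drop] at h
            simpa [Nat.add_comm] using h
          have hd2 : data.drop e = (data.drop (s + 1)).drop pre2.length := by
            rw [List.drop_drop]; congr 1
          rw [hd2, hd1, hsplit2, List.drop_left]
        have helen : e < data.length := by
          by_contra hcon
          have : data.drop e = [] := List.drop_eq_nil_of_le (by omega)
          rw [hdrope] at this; simp at this
        have hblen : b < data.length := by
          by_contra hcon
          have : data.drop b = [] := List.drop_eq_nil_of_le (by omega)
          rw [hsplit] at this; simp at this
        show pvLoopA data fuel e (acc ++ [[some (s : Int), some ((e : Int) - 1)]])
          = acc ++ pvSpecRun (data.drop b) none b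
        rw [ih e (acc ++ [[some (s : Int), some ((e : Int) - 1)]]) (by omega)]
        rw [hspec, hsplit2, pvSpec_run_to_0 pre2 hnm2 suf2 s (s + 1), hdrope, ← he]
        simp [pvSpecRun]

-- ===== VERDICT (by name: the statement is the Claim_ definition above) =====
theorem find_constant_1_spec : Claim_equal_find_constant_1 := by
  intro data _
  unfold Spec_find_constant_1
  rw [find_constant_1, pvA_inv data (data.length + 1) 0 [] (by omega), pvB_eq_spec]
  simp
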